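-- pv_equiv track=rewrite | github.com/kjhholt-alt/operator-core | src/operator_core/recipes/schedule.py | _cron_dow_to_systemd
-- ===== SOURCE A (Python) =====
-- _DOW_SYSTEMD = {"0": "Sun", "1": "Mon", "2": "Tue", "3": "Wed", "4": "Thu", "5": "Fri", "6": "Sat", "7": "Sun"}
--
-- def _cron_dow_to_systemd(dow: str) -> str:
--     parts: list[str] = []
--     for chunk in dow.split(","):
--         if "-" in chunk:
--             a, b = chunk.split("-", 1)
--             try:
--                 ai, bi = int(a), int(b)
--             except ValueError:
--                 continue
--             for i in range(ai, bi + 1):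
--                 v = _DOW_SYSTEMD.get(str(i))
--                 if v and v not in parts:
--                     parts.append(v)
--         else:
--             v = _DOW_SYSTEMD.get(chunk)
--             if v and v not in parts:
--                 parts.append(v)
--     return ",".join(parts)
-- ===== SOURCE B (Python) =====
-- _DOW_SYSTEMD = {"0": "Sun", "1": "Mon", "2": "Tue", "3": "Wed", "4": "Thu", "5": "Fri", "6": "Sat", "7": "Sun"}
--
-- _DOW_NAMES = ("Mon", "Tue", "Wed", "Thu", "Fri", "Sat", "Sun")
--
--
-- def _expand_keys(dow: str) -> list:
--     # Phase 1: flatten the spec into a stream of dict keys (ranges expanded, bad ranges skipped).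
--     keys = []
--     for chunk in dow.split(","):
--         if "-" in chunk:
--             a, b = chunk.split("-", 1)
--             try:
--                 lo, hi = int(a), int(b)
--             except ValueError:
--                 continue
--             keys.extend(map(str, range(lo, hi + 1)))
--         else:
--             keys.append(chunk)
--     return keys
--
--
-- def _cron_dow_to_systemd(dow: str) -> str:
--     # Phase 2: map the key stream through the table (keeping duplicates).
--     vals = [_DOW_SYSTEMD[k] for k in _expand_keys(dow) if k in _DOW_SYSTEMD]
--     # Phase 3: scan the seven candidate names and order the ones that occur
--     # by their first occurrence in the stream.
--     names = [n for n in _DOW_NAMES if n in vals]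
--     return ",".join(sorted(names, key=vals.index))
-- ===== Notes on version B (the rewrite author's own statement) =====
-- stated objective: alternative
-- what changed: B is a staged pipeline: it expands the spec into a flat stream of dict keys, maps it through the table keeping duplicates, and then replaces A's in-loop membership-guarded append dedup by scanning the seven candidate day names and sorting the ones present by their first-occurrence index in the stream.
import Mathlib
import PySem

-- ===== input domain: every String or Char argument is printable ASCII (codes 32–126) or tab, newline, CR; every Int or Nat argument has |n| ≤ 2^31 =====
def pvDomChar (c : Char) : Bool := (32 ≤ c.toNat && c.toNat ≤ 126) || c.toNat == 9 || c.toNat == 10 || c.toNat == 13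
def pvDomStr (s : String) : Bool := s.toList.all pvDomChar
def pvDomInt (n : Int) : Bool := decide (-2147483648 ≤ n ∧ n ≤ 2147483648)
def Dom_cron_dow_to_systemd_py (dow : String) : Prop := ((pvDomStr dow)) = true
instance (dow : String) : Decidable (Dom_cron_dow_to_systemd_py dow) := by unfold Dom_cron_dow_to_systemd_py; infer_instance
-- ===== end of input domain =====

-- B restructures A's guarded single pass into a staged pipeline (expand keys, map through the
-- table with duplicates, then order the candidate day names by first-occurrence index): an
-- alternative decomposition, not claimed faster.

-- ===== PORT A =====
def pvDowDict : PySem.Dict String String :=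
  PySem.Dict.ofList [("0", "Sun"), ("1", "Mon"), ("2", "Tue"), ("3", "Wed"),
                     ("4", "Thu"), ("5", "Fri"), ("6", "Sat"), ("7", "Sun")]

def cron_dow_to_systemd_py (dow : String) : String :=
  -- "," is non-empty, so split? is always some
  let parts : List String :=
    ((PySem.Str.split? dow ",").getD []).foldl (fun parts chunk =>
      if PySem.Str.isIn "-" chunk then
        -- a, b = chunk.split("-", 1)  ("-" is in chunk, so exactly two pieces)
        match PySem.Str.splitMax? chunk "-" 1 with
        | some [a, b] =>
          match PySem.Int.ofStr? a, PySem.Int.ofStr? b with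
          | some ai, some bi =>
            (PySem.List.pyRange ai (bi + 1) 1).foldl (fun parts i =>
              match pvDowDict.get? (PySem.Int.toStr i) with
              | some v => if v ≠ "" ∧ v ∉ parts then parts ++ [v] else parts
              | none => parts) parts
          | _, _ => parts        -- ValueError: continue
        | _ => parts             -- unreachable
      else
        match pvDowDict.get? chunk with
        | some v => if v ≠ "" ∧ v ∉ parts then parts ++ [v] else parts
        | none => parts) []
  PySem.Str.join "," parts

-- ===== PORT B =====
-- B keeps its own copy of the day table (its Python is a separate module-level dict)
def pvDowDictAlt : PySem.Dict String String :=
  PySem.Dict.ofList [("0", "Sun"), ("1", "Mon"), ("2", "Tue"), ("3", "Wed"),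
                     ("4", "Thu"), ("5", "Fri"), ("6", "Sat"), ("7", "Sun")]

def pvDowNames : List String := ["Mon", "Tue", "Wed", "Thu", "Fri", "Sat", "Sun"]

-- phase 1: flatten the spec into a stream of dict keys (ranges expanded, bad ranges skipped)
def pvExpandKeys (dow : String) : List String :=
  ((PySem.Str.split? dow ",").getD []).foldl (fun keys chunk =>
    if PySem.Str.isIn "-" chunk then
      -- a, b = chunk.split("-", 1): "-" is in chunk, so exactly two pieces
      let ps := (PySem.Str.splitMax? chunk "-" 1).getD []
      if ps.length == 2 then
        -- try: lo, hi = int(a), int(b)  /  except ValueError: continue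
        (PySem.Int.ofStr? (ps.getD 0 "")).elim keys (fun lo =>
          (PySem.Int.ofStr? (ps.getD 1 "")).elim keys (fun hi =>
            keys ++ (PySem.List.pyRange lo (hi + 1) 1).map PySem.Int.toStr))
      else keys                  -- unreachable
    else keys ++ [chunk]) []

def cron_dow_to_systemd_py_alt (dow : String) : String :=
  -- phase 2: [_DOW_SYSTEMD[k] for k in keys if k in _DOW_SYSTEMD]  (guarded lookup = filterMap)
  let vals : List String := (pvExpandKeys dow).filterMap (fun k => pvDowDictAlt.get? k)
  -- phase 3: names present, ordered by first occurrence in the stream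
  let names : List String := pvDowNames.filter (fun n => vals.contains n)
  -- key=vals.index: every name kept by the filter occurs in vals, so index? is some (getD unreachable)
  PySem.Str.join "," (PySem.List.sorted names (fun n => (PySem.List.index? vals n).getD 0))

-- ===== PRECONDITION & SPEC =====
def Spec_cron_dow_to_systemd_py (dow : String) (out : String) : Prop := out = cron_dow_to_systemd_py_alt dow
instance (dow : String) (out : String) : Decidable (Spec_cron_dow_to_systemd_py dow out) := by unfold Spec_cron_dow_to_systemd_py; infer_instance

-- ===== CLAIM (what is proved, stated in full; the proofs are below) =====
def Claim_equal_cron_dow_to_systemd_py : Prop := ∀ (dow : String), Dom_cron_dow_to_systemd_py dow → Spec_cron_dow_to_systemd_py dow (cron_dow_to_systemd_py dow)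

-- ===== LEMMAS AND PROOFS =====

-- the values a single chunk contributes to the stream (shared characterisation of both loops)
def pvValsA (chunk : String) : List String :=
  if PySem.Str.isIn "-" chunk then
    match PySem.Str.splitMax? chunk "-" 1 with
    | some [a, b] =>
      match PySem.Int.ofStr? a, PySem.Int.ofStr? b with
      | some ai, some bi =>
        (PySem.List.pyRange ai (bi + 1) 1).filterMap (fun i => pvDowDict.get? (PySem.Int.toStr i))
      | _, _ => []
    | _ => []
  else (pvDowDict.get? chunk).toList

theorem pvDict_val_ne_empty (c v : String) (h : pvDowDict.get? c = some v) : ¬ (v = "") := by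
  rw [show pvDowDict = PySem.Dict.mk [("0", "Sun"), ("1", "Mon"), ("2", "Tue"), ("3", "Wed"),
      ("4", "Thu"), ("5", "Fri"), ("6", "Sat"), ("7", "Sun")] from rfl] at h
  simp only [PySem.Dict.get?_mk_cons] at h
  split_ifs at h
  all_goals try (rw [Option.some_inj] at h; subst h; decide)
  simp_all [PySem.Dict.get?]

theorem pvDict_val_mem_names (c v : String) (h : pvDowDict.get? c = some v) : v ∈ pvDowNames := by
  rw [show pvDowDict = PySem.Dict.mk [("0", "Sun"), ("1", "Mon"), ("2", "Tue"), ("3", "Wed"),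
      ("4", "Thu"), ("5", "Fri"), ("6", "Sat"), ("7", "Sun")] from rfl] at h
  simp only [PySem.Dict.get?_mk_cons] at h
  split_ifs at h
  all_goals try (rw [Option.some_inj] at h; subst h; decide)
  simp_all [PySem.Dict.get?]

-- A's inner range loop is a fold of Set.add over the filterMap of the dict lookups
theorem pvInner_eq (l : List Int) (parts : List String) :
    l.foldl (fun parts i =>
        match pvDowDict.get? (PySem.Int.toStr i) with
        | some v => if v ≠ "" ∧ v ∉ parts then parts ++ [v] else parts
        | none => parts) parts
      = (l.filterMap (fun i => pvDowDict.get? (PySem.Int.toStr i))).foldl PySem.Set.add parts := by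
  induction l generalizing parts with
  | nil => rfl
  | cons i t ih =>
    simp only [List.foldl_cons, List.filterMap_cons]
    cases hg : pvDowDict.get? (PySem.Int.toStr i) with
    | none => exact ih parts
    | some v =>
      simp only [List.foldl_cons]
      rw [show (if v ≠ "" ∧ v ∉ parts then parts ++ [v] else parts) = PySem.Set.add parts v from ?_]
      · exact ih _
      · rw [PySem.Set.add_eq_ite]
        by_cases hm : v ∈ parts
        · simp [hm]
        · simp [hm, pvDict_val_ne_empty _ _ hg]

-- one step of A's chunk loop, as a Set.add fold over that chunk's values
theorem pvAstep (parts : List String) (chunk : String) :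
    (if PySem.Str.isIn "-" chunk then
        match PySem.Str.splitMax? chunk "-" 1 with
        | some [a, b] =>
          match PySem.Int.ofStr? a, PySem.Int.ofStr? b with
          | some ai, some bi =>
            (PySem.List.pyRange ai (bi + 1) 1).foldl (fun parts i =>
              match pvDowDict.get? (PySem.Int.toStr i) with
              | some v => if v ≠ "" ∧ v ∉ parts then parts ++ [v] else parts
              | none => parts) parts
          | _, _ => parts
        | _ => parts
      else
        match pvDowDict.get? chunk with
        | some v => if v ≠ "" ∧ v ∉ parts then parts ++ [v] else parts
        | none => parts)
    = (pvValsA chunk).foldl PySem.Set.add parts := by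
  unfold pvValsA
  by_cases hin : PySem.Str.isIn "-" chunk = true
  · rw [if_pos hin, if_pos hin]
    rcases hs : PySem.Str.splitMax? chunk "-" 1 with _ | ⟨_ | ⟨a, _ | ⟨b, _ | ⟨x, t⟩⟩⟩⟩
    · rfl
    · rfl
    · rfl
    · show (match PySem.Int.ofStr? a, PySem.Int.ofStr? b with
            | some ai, some bi =>
              (PySem.List.pyRange ai (bi + 1) 1).foldl (fun parts i =>
                match pvDowDict.get? (PySem.Int.toStr i) with
                | some v => if v ≠ "" ∧ v ∉ parts then parts ++ [v] else parts
                | none => parts) parts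
            | _, _ => parts)
          = (match PySem.Int.ofStr? a, PySem.Int.ofStr? b with
            | some ai, some bi =>
              (PySem.List.pyRange ai (bi + 1) 1).filterMap (fun i => pvDowDict.get? (PySem.Int.toStr i))
            | _, _ => []).foldl PySem.Set.add parts
      rcases PySem.Int.ofStr? a with _ | ai
      · rcases PySem.Int.ofStr? b with _ | bi <;> rfl
      · rcases PySem.Int.ofStr? b with _ | bi
        · rfl
        · exact pvInner_eq _ parts
    · rfl
  · rw [if_neg hin, if_neg hin]
    rcases hg : pvDowDict.get? chunk with _ | v
    · rfl
    · simp only [Option.toList, List.foldl_cons, List.foldl_nil]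
      rw [PySem.Set.add_eq_ite]
      by_cases hm : v ∈ parts
      · simp [hm]
      · simp [hm, pvDict_val_ne_empty _ _ hg]

-- A's whole loop is a fold of Set.add over the concatenation of per-chunk values
theorem pvA_foldl (chunks : List String) (parts : List String) :
    chunks.foldl (fun parts chunk =>
      if PySem.Str.isIn "-" chunk then
        match PySem.Str.splitMax? chunk "-" 1 with
        | some [a, b] =>
          match PySem.Int.ofStr? a, PySem.Int.ofStr? b with
          | some ai, some bi =>
            (PySem.List.pyRange ai (bi + 1) 1).foldl (fun parts i =>
              match pvDowDict.get? (PySem.Int.toStr i) with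
              | some v => if v ≠ "" ∧ v ∉ parts then parts ++ [v] else parts
              | none => parts) parts
          | _, _ => parts
        | _ => parts
      else
        match pvDowDict.get? chunk with
        | some v => if v ≠ "" ∧ v ∉ parts then parts ++ [v] else parts
        | none => parts) parts
    = (chunks.flatMap pvValsA).foldl PySem.Set.add parts := by
  induction chunks generalizing parts with
  | nil => rfl
  | cons c cs ih =>
    simp only [List.foldl_cons, List.flatMap_cons, List.foldl_append]
    rw [pvAstep]
    exact ih _

-- the keys a single chunk contributes to B's key stream
def pvKeysOf (chunk : String) : List String :=
  if PySem.Str.isIn "-" chunk then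
    let ps := (PySem.Str.splitMax? chunk "-" 1).getD []
    if ps.length == 2 then
      (PySem.Int.ofStr? (ps.getD 0 "")).elim [] (fun lo =>
        (PySem.Int.ofStr? (ps.getD 1 "")).elim [] (fun hi =>
          (PySem.List.pyRange lo (hi + 1) 1).map PySem.Int.toStr))
    else []
  else [chunk]

-- one step of B's key loop
theorem pvKstep (keys : List String) (chunk : String) :
    (if PySem.Str.isIn "-" chunk then
        let ps := (PySem.Str.splitMax? chunk "-" 1).getD []
        if ps.length == 2 then
          (PySem.Int.ofStr? (ps.getD 0 "")).elim keys (fun lo =>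
            (PySem.Int.ofStr? (ps.getD 1 "")).elim keys (fun hi =>
              keys ++ (PySem.List.pyRange lo (hi + 1) 1).map PySem.Int.toStr))
        else keys
      else keys ++ [chunk])
    = keys ++ pvKeysOf chunk := by
  unfold pvKeysOf
  by_cases hin : PySem.Str.isIn "-" chunk = true
  · rw [if_pos hin, if_pos hin]
    by_cases hl : ((PySem.Str.splitMax? chunk "-" 1).getD []).length == 2
    · simp only [hl, if_pos]
      cases PySem.Int.ofStr? (((PySem.Str.splitMax? chunk "-" 1).getD []).getD 0 "") <;>
        cases PySem.Int.ofStr? (((PySem.Str.splitMax? chunk "-" 1).getD []).getD 1 "") <;>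
        simp
    · simp [hl]
  · rw [if_neg hin, if_neg hin]

theorem pvExpandKeys_eq (dow : String) :
    pvExpandKeys dow = ((PySem.Str.split? dow ",").getD []).flatMap pvKeysOf := by
  unfold pvExpandKeys
  generalize (PySem.Str.split? dow ",").getD [] = chunks
  suffices h : ∀ (keys : List String), chunks.foldl (fun keys chunk =>
      if PySem.Str.isIn "-" chunk then
        let ps := (PySem.Str.splitMax? chunk "-" 1).getD []
        if ps.length == 2 then
          (PySem.Int.ofStr? (ps.getD 0 "")).elim keys (fun lo =>
            (PySem.Int.ofStr? (ps.getD 1 "")).elim keys (fun hi =>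
              keys ++ (PySem.List.pyRange lo (hi + 1) 1).map PySem.Int.toStr))
        else keys
      else keys ++ [chunk]) keys = keys ++ chunks.flatMap pvKeysOf by
    simpa using h []
  induction chunks with
  | nil => simp
  | cons c cs ih =>
    intro keys
    simp only [List.foldl_cons, List.flatMap_cons]
    rw [pvKstep, ih, List.append_assoc]

-- per chunk, B's keys looked up through the dict give exactly A's values
theorem pvKeys_filterMap (chunk : String) :
    (pvKeysOf chunk).filterMap (fun k => pvDowDict.get? k) = pvValsA chunk := by
  unfold pvKeysOf pvValsA
  by_cases hin : PySem.Str.isIn "-" chunk = true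
  · rw [if_pos hin, if_pos hin]
    cases hs : PySem.Str.splitMax? chunk "-" 1 with
    | none => simp
    | some l =>
      simp only [Option.getD_some]
      rcases l with _ | ⟨a, _ | ⟨b, _ | ⟨c, t⟩⟩⟩
      · simp
      · simp
      · cases ha : PySem.Int.ofStr? a <;> cases hb : PySem.Int.ofStr? b <;>
          simp [ha, hb, List.filterMap_map, Function.comp]
      · simp
  · rw [if_neg hin, if_neg hin]
    cases h : pvDowDict.get? chunk <;> simp [h]

-- Set.ofList, one step at the head
theorem pvFoldl_add_acc (l acc : List String) :
    l.foldl PySem.Set.add acc = acc ++ (PySem.Set.ofList l).filter (fun y => !(acc.contains y)) := by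
  induction l generalizing acc with
  | nil => simp [PySem.Set.ofList, PySem.Set.empty]
  | cons x t ih =>
    have hof : PySem.Set.ofList (x :: t) = [x] ++ (PySem.Set.ofList t).filter (fun y => !([x].contains y)) := by
      show List.foldl PySem.Set.add (PySem.Set.add PySem.Set.empty x) t = _
      rw [show PySem.Set.add PySem.Set.empty x = [x] from rfl, ih]
    simp only [List.foldl_cons]
    rw [ih, hof]
    rw [PySem.Set.add_eq_ite]
    by_cases hm : x ∈ acc
    · rw [if_pos hm]
      congr 1
      simp only [List.filter_append, List.filter_filter]
      rw [show (List.filter (fun y => !acc.contains y) [x]) = [] by simp [hm]]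
      rw [List.nil_append, List.filter_congr]
      intro y _
      by_cases hy : y ∈ acc
      · simp [hy]
      · have : y ≠ x := fun h => hy (h ▸ hm)
        simp [hy, this]
    · rw [if_neg hm, List.append_assoc]
      congr 1
      simp only [List.filter_append, List.filter_filter]
      rw [show (List.filter (fun y => !acc.contains y) [x]) = [x] by simp [hm]]
      congr 1
      apply List.filter_congr
      intro y _
      by_cases hx : y = x
      · simp [hx, hm]
      · by_cases hy : y ∈ acc <;> simp [hx, hy]

theorem pvOfList_cons (x : String) (t : List String) :
    PySem.Set.ofList (x :: t) = x :: (PySem.Set.ofList t).filter (fun y => !([x].contains y)) := by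
  show List.foldl PySem.Set.add (PySem.Set.add PySem.Set.empty x) t = _
  rw [show PySem.Set.add PySem.Set.empty x = [x] from rfl, pvFoldl_add_acc]
  rfl

-- first occurrences come out of Set.ofList in order of strictly increasing first index
theorem pvOfList_pairwise (l : List String) :
    (PySem.Set.ofList l).Pairwise
      (fun a b => (PySem.List.index? l a).getD 0 < (PySem.List.index? l b).getD 0) := by
  induction l with
  | nil => simp [PySem.Set.ofList, PySem.Set.empty]
  | cons x t ih =>
    rw [pvOfList_cons, List.pairwise_cons]
    constructor
    · intro b hb
      have hbm := List.mem_filter.mp hb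
      have hbne : b ≠ x := by simpa using hbm.2
      have hbt : b ∈ t := (PySem.Set.mem_ofList t b).mp hbm.1
      rcases hk : PySem.List.index? t b with _ | k
      · exact absurd ((PySem.List.index?_eq_none_iff t b).mp hk) (by simp [hbt])
      · rw [PySem.List.index?_cons_self, PySem.List.index?_cons_of_ne t (fun h => hbne h.symm), hk]
        simp
    · have hp := List.Pairwise.filter (fun y => !([x].contains y)) ih
      refine hp.imp_of_mem ?_
      intro a b ha hb hab
      have ham := List.mem_filter.mp ha
      have hbm := List.mem_filter.mp hb
      have hane : a ≠ x := by simpa using ham.2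
      have hbne : b ≠ x := by simpa using hbm.2
      have hat : a ∈ t := (PySem.Set.mem_ofList t a).mp ham.1
      have hbt : b ∈ t := (PySem.Set.mem_ofList t b).mp hbm.1
      rcases hka : PySem.List.index? t a with _ | ka
      · exact absurd ((PySem.List.index?_eq_none_iff t a).mp hka) (by simp [hat])
      rcases hkb : PySem.List.index? t b with _ | kb
      · exact absurd ((PySem.List.index?_eq_none_iff t b).mp hkb) (by simp [hbt])
      rw [PySem.List.index?_cons_of_ne t (fun h => hane h.symm),
          PySem.List.index?_cons_of_ne t (fun h => hbne h.symm), hka, hkb]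
      rw [hka, hkb] at hab
      simpa using Nat.add_lt_add_right (by simpa using hab) 1

-- every stream value is a dict value
theorem pvValsA_mem (chunk v : String) (hv : v ∈ pvValsA chunk) :
    ∃ k, pvDowDict.get? k = some v := by
  unfold pvValsA at hv
  split at hv
  · split at hv
    · split at hv
      · rcases List.mem_filterMap.mp hv with ⟨i, _, hi⟩
        exact ⟨_, hi⟩
      all_goals simp at hv
    all_goals simp at hv
  · rcases Option.mem_toList.mp hv with h
    exact ⟨chunk, h⟩

-- B's select-and-sort equals ordered dedup, for a stream of table values
theorem pvSort_eq_ofList (vals : List String) (hsub : ∀ v ∈ vals, v ∈ pvDowNames) :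
    PySem.List.sorted (pvDowNames.filter (fun n => vals.contains n))
      (fun n => (PySem.List.index? vals n).getD 0) = PySem.Set.ofList vals := by
  apply PySem.List.sorted_eq_of_perm_of_pairwise_lt
  · rw [List.perm_ext_iff_of_nodup (PySem.Set.nodup_ofList vals)
        (List.Nodup.filter _ (show pvDowNames.Nodup by decide))]
    intro a
    rw [PySem.Set.mem_ofList, List.mem_filter]
    constructor
    · intro ha; exact ⟨hsub a ha, by simpa using ha⟩
    · intro ⟨_, ha⟩; simpa using ha
  · exact pvOfList_pairwise vals

-- ===== VERDICT (by name: the statement is the Claim_ definition above) =====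
theorem cron_dow_to_systemd_py_spec : Claim_equal_cron_dow_to_systemd_py := by
  intro dow _
  unfold Spec_cron_dow_to_systemd_py
  simp only [cron_dow_to_systemd_py, cron_dow_to_systemd_py_alt]
  rw [pvA_foldl, pvExpandKeys_eq, show pvDowDictAlt = pvDowDict from rfl,
      List.filterMap_flatMap]
  simp only [pvKeys_filterMap]
  rw [pvSort_eq_ofList _ (fun v hv => by
    rcases List.mem_flatMap.mp hv with ⟨c, _, hc⟩
    rcases pvValsA_mem c v hc with ⟨k, hk⟩
    exact pvDict_val_mem_names k v hk)]
  rfl
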